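-- pv_equiv track=rewrite | github.com/cjc-github/android_native_code_statistics | collect_information/utils.py | deal2
-- ===== SOURCE A (Python) =====
-- def deal2(dict1, func_re):
--     data = ""
--     j = 0
--     for i in range(len(func_re)):
--         if func_re[i] == '[':
--             j = j + 1
--         elif func_re[i] in dict1:
--             data = dict1.get(func_re[i])
--             for _ in range(j):
--                 data = data + "[]"
--     return data
-- ===== SOURCE B (Python) =====
-- def deal2(dict1, func_re):
--     # scan from the right for the last matching character, then count '[' in its prefix
--     for i in range(len(func_re) - 1, -1, -1):
--         c = func_re[i]
--         if c != '[' and c in dict1: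
--             return dict1[c] + "[]" * func_re[:i].count('[')
--     return ""
-- ===== Notes on version B (the rewrite author's own statement) =====
-- stated objective: simpler
-- what changed: Replaces A's forward fold that rebuilds the accumulated string at every dictionary hit with a reverse scan that stops at the last matching character and a single prefix count of '[', appending '[]' that many times once.
import Mathlib
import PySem

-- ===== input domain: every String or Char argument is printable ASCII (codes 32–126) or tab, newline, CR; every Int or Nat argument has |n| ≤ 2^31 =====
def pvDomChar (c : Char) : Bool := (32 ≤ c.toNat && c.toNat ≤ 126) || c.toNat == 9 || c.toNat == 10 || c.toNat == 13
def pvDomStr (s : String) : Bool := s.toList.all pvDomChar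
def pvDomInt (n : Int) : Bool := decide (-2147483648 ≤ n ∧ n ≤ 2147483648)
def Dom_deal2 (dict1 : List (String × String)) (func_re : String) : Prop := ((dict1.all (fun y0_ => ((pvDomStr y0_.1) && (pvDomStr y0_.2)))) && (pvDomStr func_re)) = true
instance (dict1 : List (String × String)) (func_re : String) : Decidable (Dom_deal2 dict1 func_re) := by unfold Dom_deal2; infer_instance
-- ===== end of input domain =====

-- B replaces A's forward fold (rebuilding the string at every dict hit) with a reverse
-- search for the last matching character plus one prefix count of '[' — simpler, single append.


-- ===== PORT A =====
-- one loop step of A: '[' bumps j; a dict key (checked then looked up) restarts data and appends "[]" j times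
def stepA (d : PySem.Dict String String) (st : List Char × Nat) (c : Char) : List Char × Nat :=
  if c = '[' then (st.1, st.2 + 1)
  else
    match d.get? (String.ofList [c]) with
    | some v => ((List.range st.2).foldl (fun acc _ => acc ++ ['[', ']']) v.toList, st.2)
    | none => st

def deal2 (dict1 : List (String × String)) (func_re : String) : String :=
  String.ofList (func_re.toList.foldl (stepA (PySem.Dict.ofList dict1)) ([], 0)).1

-- ===== PORT B =====
-- B's reverse scan: the last position whose char is ≠ '[' and a dict key;
-- returns the prefix before that position and the dict value there
def findLastMatch (d : PySem.Dict String String) : List Char → Option (List Char × String)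
  | [] => none
  | c :: rest =>
    match findLastMatch d rest with
    | some (p, v) => some (c :: p, v)
    | none =>
      if c = '[' then none
      else
        match d.get? (String.ofList [c]) with
        | some v => some ([], v)
        | none => none

def deal2_alt (dict1 : List (String × String)) (func_re : String) : String :=
  match findLastMatch (PySem.Dict.ofList dict1) func_re.toList with
  | none => ""
  | some (p, v) => String.ofList (v.toList ++ (List.replicate (p.count '[') ['[', ']']).flatten)

-- ===== PRECONDITION & SPEC =====
def Spec_deal2 (dict1 : List (String × String)) (func_re : String) (out : String) : Prop := out = deal2_alt dict1 func_re
instance (dict1 : List (String × String)) (func_re : String) (out : String) : Decidable (Spec_deal2 dict1 func_re out) := by unfold Spec_deal2; infer_instance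

-- ===== CLAIM (what is proved, stated in full; the proofs are below) =====
def Claim_equal_deal2 : Prop := ∀ (dict1 : List (String × String)) (func_re : String), Dom_deal2 dict1 func_re → Spec_deal2 dict1 func_re (deal2 dict1 func_re)

-- ===== LEMMAS AND PROOFS =====

-- characterisation of A's fold by B's last-match search
theorem foldA_eq (d : PySem.Dict String String) (cs : List Char) : ∀ (a : List Char) (j : Nat),
    cs.foldl (stepA d) (a, j) =
      ((match findLastMatch d cs with
        | none => a
        | some (p, v) =>
            (List.range (j + p.count '[')).foldl (fun acc _ => acc ++ ['[', ']']) v.toList),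
       j + cs.count '[') := by
  induction cs with
  | nil => intro a j; simp [findLastMatch]
  | cons c rest ih =>
    intro a j
    by_cases hc : c = '['
    · subst hc
      rw [List.foldl_cons, show stepA d (a, j) '[' = (a, j + 1) from rfl, ih]
      cases h : findLastMatch d rest with
      | none => simp [findLastMatch, h, ]; omega
      | some pv =>
        obtain ⟨p, v⟩ := pv
        simp [findLastMatch, h]
        rw [show j + (List.count '[' p + 1) = j + 1 + List.count '[' p by omega,
            show j + (List.count '[' rest + 1) = j + 1 + List.count '[' rest by omega]
        exact ⟨rfl, rfl⟩
    · rw [List.foldl_cons]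
      cases hg : d.get? (String.ofList [c]) with
      | none =>
        rw [show stepA d (a, j) c = (a, j) by simp [stepA, hc, hg], ih]
        cases h : findLastMatch d rest with
        | none => simp [findLastMatch, h, hc, hg, ]
        | some pv =>
          obtain ⟨p, v⟩ := pv
          simp [findLastMatch, h, hc, ]
      | some v0 =>
        rw [show stepA d (a, j) c
              = ((List.range j).foldl (fun acc _ => acc ++ ['[', ']']) v0.toList, j) by
            simp [stepA, hc, hg], ih]
        cases h : findLastMatch d rest with
        | none => simp [findLastMatch, h, hc, hg, ]
        | some pv =>
          obtain ⟨p, v⟩ := pv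
          simp [findLastMatch, h, hc, ]

-- ===== VERDICT (by name: the statement is the Claim_ definition above) =====
theorem deal2_spec : Claim_equal_deal2 := by
  intro dict1 func_re _
  unfold Spec_deal2 deal2 deal2_alt
  rw [foldA_eq]
  cases h : findLastMatch (PySem.Dict.ofList dict1) func_re.toList with
  | none => rfl
  | some pv =>
    obtain ⟨p, v⟩ := pv
    simp
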